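-- pv_equiv track=rewrite | github.com/linhdvu14/cp-sols | sols/CodeForces/1609_d12/A_Divide_and_Multiply.py | solve
-- ===== SOURCE A (Python) =====
-- def solve(N, A):
-- 	res = pow = odd = 0
-- 	for a in A:
-- 		while a & 1 == 0:
-- 			pow += 1
-- 			a >>= 1
-- 		res += a
-- 		odd = max(odd, a)
--
-- 	res += (odd << pow) - odd
-- 	return res
-- ===== SOURCE B (Python) =====
-- def solve(N, A):
--     # divide-and-conquer: recursively combine (odd_sum, pow_sum, odd_max) of the two halves
--     if not A:
--         return 0
--     def go(lo, hi):
--         if hi - lo == 1: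
--             a = A[lo]
--             low = a & -a
--             return (a // low, low.bit_length() - 1, a // low)
--         mid = (lo + hi) // 2
--         s1, p1, m1 = go(lo, mid)
--         s2, p2, m2 = go(mid, hi)
--         return (s1 + s2, p1 + p2, m1 if m1 >= m2 else m2)
--     s, p, m = go(0, len(A))
--     m = max(m, 0)
--     return s - m + (m << p)
-- ===== Notes on version B (the rewrite author's own statement) =====
-- stated objective: alternative
-- what changed: A's single left-to-right accumulator loop with an inner while-shift per element is replaced by a divide-and-conquer recursion over index ranges: each leaf computes its element's odd part and 2-exponent in closed form (a & -a), and the two halves' (odd_sum, pow_sum, odd_max) triples are merged; the answer is assembled from the root triple.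
import Mathlib
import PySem

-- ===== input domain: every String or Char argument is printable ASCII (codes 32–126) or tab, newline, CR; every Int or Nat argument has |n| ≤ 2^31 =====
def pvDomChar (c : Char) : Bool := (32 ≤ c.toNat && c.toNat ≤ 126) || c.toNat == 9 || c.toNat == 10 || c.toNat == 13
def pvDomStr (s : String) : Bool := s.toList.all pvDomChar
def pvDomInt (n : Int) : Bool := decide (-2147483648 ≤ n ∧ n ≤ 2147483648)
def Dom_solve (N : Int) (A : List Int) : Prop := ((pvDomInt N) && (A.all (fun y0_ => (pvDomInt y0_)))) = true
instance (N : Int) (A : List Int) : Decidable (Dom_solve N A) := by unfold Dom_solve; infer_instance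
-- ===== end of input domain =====

-- B replaces A's sequential accumulator loop (with an inner shift loop per element) by a
-- divide-and-conquer recursion over index ranges merging (odd_sum, pow_sum, odd_max) triples
-- (objective: alternative).

-- Python `x << n` for n ≥ 0 (exact there; both programs only shift by nonnegative amounts)
def pyShl (x : Int) (n : Nat) : Int := x * 2 ^ n

-- ===== PORT A =====
-- A's inner `while a & 1 == 0: pow += 1; a >>= 1`; the fuel only makes the loop total
-- (for a ≠ 0 the fuel a.natAbs is never exhausted; a = 0, where Python loops forever, is excluded by Pre_).
-- `a & 1` is Int.land a 1; `a >> 1` (arithmetic shift) is floor division by 2, exact.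
def stripA : Nat → Int → Int → Int × Int
  | 0, a, pw => (a, pw)
  | f + 1, a, pw => if Int.land a 1 = 0 then stripA f (a / 2) (pw + 1) else (a, pw)

def solve (N : Int) (A : List Int) : Int :=
  let st := A.foldl (fun (s : Int × Int × Int) a =>
      let r := stripA a.natAbs a s.2.1
      (s.1 + r.1, r.2, max s.2.2 r.1)) (0, 0, 0)
  st.1 + (pyShl st.2.2 st.2.1.toNat - st.2.2)

-- ===== PORT B =====
-- Source B's `go(lo, hi)`: recursion on the range [lo, hi); the fuel (≥ hi - lo at every call, so the
-- 0 case is never reached) and the guard `hi - lo ≤ 1` (Source B only ever calls go with lo < hi, where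
-- it coincides with `hi - lo == 1`) only make the recursion total.
-- `A[lo]` (always in range in Source B) is A.getD lo 0; `low.bit_length() - 1` is (Nat.size low.natAbs : Int) - 1;
-- `a // low` is Int floor division, exact for low > 0.
def goB (A : List Int) (fuel lo hi : Nat) : Int × Int × Int :=
  match fuel with
  | 0 =>
    (A.getD lo 0 / Int.land (A.getD lo 0) (-(A.getD lo 0)),
     (Nat.size (Int.land (A.getD lo 0) (-(A.getD lo 0))).natAbs : Int) - 1,
     A.getD lo 0 / Int.land (A.getD lo 0) (-(A.getD lo 0)))
  | f + 1 =>
    if hi - lo ≤ 1 then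
      (A.getD lo 0 / Int.land (A.getD lo 0) (-(A.getD lo 0)),
       (Nat.size (Int.land (A.getD lo 0) (-(A.getD lo 0))).natAbs : Int) - 1,
       A.getD lo 0 / Int.land (A.getD lo 0) (-(A.getD lo 0)))
    else
      ((goB A f lo ((lo + hi) / 2)).1 + (goB A f ((lo + hi) / 2) hi).1,
       (goB A f lo ((lo + hi) / 2)).2.1 + (goB A f ((lo + hi) / 2) hi).2.1,
       if (goB A f lo ((lo + hi) / 2)).2.2 ≥ (goB A f ((lo + hi) / 2) hi).2.2
         then (goB A f lo ((lo + hi) / 2)).2.2 else (goB A f ((lo + hi) / 2) hi).2.2)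

def solve_alt (N : Int) (A : List Int) : Int :=
  if A = [] then 0
  else
    (goB A A.length 0 A.length).1 - max (goB A A.length 0 A.length).2.2 0
      + pyShl (max (goB A A.length 0 A.length).2.2 0) (goB A A.length 0 A.length).2.1.toNat

-- ===== PRECONDITION & SPEC =====
-- Pre_ excludes exactly the lists containing 0: there A's inner while-loop never terminates
-- (0 & 1 == 0 forever), so A returns on precisely the inputs Pre_ admits (B raises ZeroDivisionError there).
def Pre_solve (N : Int) (A : List Int) : Prop := (0 : Int) ∉ A
instance (N : Int) (A : List Int) : Decidable (Pre_solve N A) := by unfold Pre_solve; infer_instance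
def pvWitness_solve : Int × List Int := (2, [6, 5])
def Spec_solve (N : Int) (A : List Int) (out : Int) : Prop := out = solve_alt N A
instance (N : Int) (A : List Int) (out : Int) : Decidable (Spec_solve N A out) := by unfold Spec_solve; infer_instance

-- ===== CLAIM (what is proved, stated in full; the proofs are below) =====
def Claim_equal_solve : Prop := ∀ (N : Int) (A : List Int), Dom_solve N A → Pre_solve N A → Spec_solve N A (solve N A)

-- ===== LEMMAS AND PROOFS =====

-- the odd part and 2-adic exponent both programs compute per element
def oddOf (a : Int) : Int := a / Int.land a (-a)
def powOf (a : Int) : Nat := Nat.size (Int.land a (-a)).natAbs - 1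

-- maximum of a nonempty list (0 on [])
def nMax : List Int → Int
  | [] => 0
  | x :: t => t.foldl max x

theorem lnot_eq (d : Int) : Int.lnot d = -d - 1 := by
  cases d with
  | ofNat n =>
      rw [show Int.lnot (Int.ofNat n) = Int.negSucc n from rfl, Int.negSucc_eq,
        Int.ofNat_eq_natCast]
      ring
  | negSucc n =>
      rw [show Int.lnot (Int.negSucc n) = Int.ofNat n from rfl, Int.negSucc_eq,
        Int.ofNat_eq_natCast]
      ring

theorem nat_ldiff_self (n : Nat) : Nat.ldiff n n = 0 := by
  apply Nat.eq_of_testBit_eq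
  intro i
  simp [Nat.testBit_ldiff]

theorem nat_zero_ldiff (n : Nat) : Nat.ldiff 0 n = 0 := by
  apply Nat.eq_of_testBit_eq
  intro i
  simp [Nat.testBit_ldiff]

theorem land_lnot_self (m : Int) : Int.land m (Int.lnot m) = 0 := by
  cases m with
  | ofNat n => simp [Int.lnot, Int.land, nat_ldiff_self]
  | negSucc n => simp [Int.lnot, Int.land, nat_ldiff_self]

theorem land_zero (d : Int) : Int.land d 0 = 0 := by
  cases d with
  | ofNat n => simp [Int.land]
  | negSucc n => simp [Int.land, nat_zero_ldiff]

theorem one_eq_bit : (1 : Int) = Int.bit true 0 := rfl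

-- A's loop on a ≠ 0 lands exactly on the closed form: the low bit is 2 ^ k,
-- the loop returns the odd part a / 2 ^ k and adds k to the accumulator.
theorem strip_spec : ∀ n : Nat, ∀ a : Int, a ≠ 0 → a.natAbs ≤ n →
    ∃ k : Nat, Int.land a (-a) = 2 ^ k ∧
      ∀ f : Nat, n ≤ f → ∀ pw : Int, stripA f a pw = (a / 2 ^ k, pw + k) := by
  intro n
  induction n using Nat.strong_induction_on with
  | _ n IH =>
    intro a ha hle
    have hd : Int.bit (Int.bodd a) (Int.div2 a) = a := Int.bit_decomp a
    cases hb : Int.bodd a with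
    | true =>
      rw [hb] at hd
      obtain ⟨d, rfl⟩ : ∃ d, a = Int.bit true d := ⟨Int.div2 a, hd.symm⟩
      have hneg : -(Int.bit true d) = Int.bit true (Int.lnot d) := by
        rw [Int.bit_val, Int.bit_val, lnot_eq]
        simp only [Bool.cond_true]
        ring
      have hland : Int.land (Int.bit true d) (-(Int.bit true d)) = 1 := by
        rw [hneg, Int.land_bit, land_lnot_self]
        exact one_eq_bit.symm
      have hland1 : Int.land (Int.bit true d) 1 = 1 := by
        rw [one_eq_bit, Int.land_bit, land_zero]
        simp
      refine ⟨0, by simpa using hland, ?_⟩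
      intro f _ pw
      cases f with
      | zero => simp [stripA]
      | succ f' =>
        simp only [stripA]
        rw [if_neg (by rw [hland1]; norm_num)]
        simp
    | false =>
      rw [hb] at hd
      obtain ⟨d, rfl⟩ : ∃ d, a = Int.bit false d := ⟨Int.div2 a, hd.symm⟩
      have hbval : Int.bit false d = 2 * d := by
        rw [Int.bit_val]
        simp
      have hd0 : d ≠ 0 := by
        intro h
        apply ha
        rw [h]
        rfl
      have habs : (Int.bit false d).natAbs = 2 * d.natAbs := by
        rw [hbval, Int.natAbs_mul]
        rfl
      have hpos : 0 < d.natAbs := Int.natAbs_pos.mpr hd0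
      obtain ⟨k, hk, hstep⟩ := IH (n - 1) (by omega) d hd0 (by omega)
      have hneg : -(Int.bit false d) = Int.bit false (-d) := by
        rw [Int.bit_val, Int.bit_val]
        simp
      have hland : Int.land (Int.bit false d) (-(Int.bit false d)) = 2 ^ (k + 1) := by
        rw [hneg, Int.land_bit, hk]
        rw [show ((false && false) = false) from rfl, Int.bit_val]
        simp only [Bool.cond_false, add_zero]
        ring
      have hcond : Int.land (Int.bit false d) 1 = 0 := by
        rw [one_eq_bit, Int.land_bit, land_zero]
        rfl
      refine ⟨k + 1, hland, ?_⟩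
      intro f hf pw
      obtain ⟨f', rfl⟩ : ∃ f', f = f' + 1 := ⟨f - 1, by omega⟩
      simp only [stripA]
      rw [if_pos hcond]
      have hdiv : Int.bit false d / 2 = d := by
        rw [hbval]
        exact Int.mul_ediv_cancel_left d (by norm_num)
      rw [hdiv, hstep f' (by omega) (pw + 1)]
      have hdd : Int.bit false d / 2 ^ (k + 1) = d / 2 ^ k := by
        rw [hbval, pow_succ, mul_comm ((2 : Int) ^ k) 2]
        exact Int.mul_ediv_mul_of_pos _ _ (by norm_num)
      rw [hdd]
      simp only [Prod.mk.injEq, true_and]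
      push_cast
      ring

theorem strip_eval (a : Int) (ha : a ≠ 0) (pw : Int) :
    stripA a.natAbs a pw = (oddOf a, pw + powOf a) ∧ Int.land a (-a) = 2 ^ powOf a := by
  obtain ⟨k, hk, hstep⟩ := strip_spec a.natAbs a ha le_rfl
  have hpow : powOf a = k := by
    unfold powOf
    rw [hk, Int.natAbs_pow]
    simp [Nat.size_pow]
  constructor
  · rw [hpow, hstep a.natAbs le_rfl pw]
    unfold oddOf
    rw [hk]
  · rw [hpow, hk]

theorem foldA_spec : ∀ (L : List Int), (∀ x ∈ L, x ≠ 0) → ∀ r p d : Int,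
    L.foldl (fun (s : Int × Int × Int) a =>
      let rr := stripA a.natAbs a s.2.1
      (s.1 + rr.1, rr.2, max s.2.2 rr.1)) (r, p, d)
    = (r + (L.map oddOf).sum, p + ((L.map powOf).sum : Nat), (L.map oddOf).foldl max d) := by
  intro L
  induction L with
  | nil => intro _ r p d; simp
  | cons a L IH =>
    intro h r p d
    have ha : a ≠ 0 := h a (by simp)
    rw [List.foldl_cons]
    simp only [(strip_eval a ha p).1]
    rw [IH (fun x hx => h x (by simp [hx])) (r + oddOf a) (p + powOf a) (max d (oddOf a))]
    simp only [List.map_cons, List.sum_cons, List.foldl_cons, Prod.mk.injEq]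
    exact ⟨by ring, by push_cast; ring, trivial⟩

theorem foldl_max_max (L : List Int) : ∀ x y : Int, L.foldl max (max x y) = max x (L.foldl max y) := by
  induction L with
  | nil => intro x y; rfl
  | cons a L IH =>
    intro x y
    simp only [List.foldl_cons, max_assoc]
    exact IH x (max y a)

theorem if_ge_eq_max (x y : Int) : (if x ≥ y then x else y) = max x y := by
  rw [max_def]
  split_ifs <;> omega

theorem nMax_append (l1 l2 : List Int) (h1 : l1 ≠ []) (h2 : l2 ≠ []) :
    nMax (l1 ++ l2) = max (nMax l1) (nMax l2) := by
  obtain ⟨x, t, rfl⟩ := List.exists_cons_of_ne_nil h1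
  obtain ⟨y, u, rfl⟩ := List.exists_cons_of_ne_nil h2
  simp only [nMax, List.cons_append, List.foldl_append, List.foldl_cons]
  rw [← foldl_max_max u (t.foldl max x) y]

-- goB with enough fuel on a valid range computes the triple of the corresponding segment
theorem goB_spec (A : List Int) (hnz : ∀ x ∈ A, x ≠ 0) :
    ∀ fuel lo hi, hi - lo ≤ fuel → lo < hi → hi ≤ A.length →
    goB A fuel lo hi = (((A.drop lo).take (hi - lo) |>.map oddOf).sum,
                   (((((A.drop lo).take (hi - lo)).map powOf).sum : Nat) : Int),
                   nMax (((A.drop lo).take (hi - lo)).map oddOf)) := by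
  intro fuel
  induction fuel with
  | zero => intro lo hi hn hlt _; omega
  | succ f IH =>
    intro lo hi hn hlt hle
    show (if hi - lo ≤ 1 then _ else _) = _
    by_cases h1 : hi - lo ≤ 1
    · rw [if_pos h1]
      have hhi : hi = lo + 1 := by omega
      have hlo : lo < A.length := by omega
      have hget : A.getD lo 0 = A[lo] := List.getD_eq_getElem A 0 hlo
      have hseg : (A.drop lo).take (hi - lo) = [A[lo]] := by
        rw [hhi, Nat.add_sub_cancel_left, List.drop_eq_getElem_cons hlo, List.take_succ_cons,
          List.take_zero]
      have ha : A[lo] ≠ 0 := hnz _ (List.getElem_mem hlo)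
      have hland := (strip_eval A[lo] ha 0).2
      have hsz : Nat.size (Int.land A[lo] (-A[lo])).natAbs = powOf A[lo] + 1 := by
        rw [hland, Int.natAbs_pow]
        simp [Nat.size_pow]
      simp only [hget, hseg, List.map_cons, List.map_nil, List.sum_cons, List.sum_nil, nMax,
        List.foldl_nil, hsz, Prod.mk.injEq, oddOf]
      refine ⟨(add_zero _).symm, by push_cast; ring, trivial⟩
    · rw [if_neg h1]
      have hmid1 : lo < (lo + hi) / 2 := by omega
      have hmid2 : (lo + hi) / 2 < hi := by omega
      rw [IH lo ((lo + hi) / 2) (by omega) hmid1 (by omega),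
          IH ((lo + hi) / 2) hi (by omega) hmid2 hle]
      have hsplit : (A.drop lo).take (hi - lo)
          = (A.drop lo).take ((lo + hi) / 2 - lo) ++ (A.drop ((lo + hi) / 2)).take (hi - (lo + hi) / 2) := by
        have h2 : hi - lo = ((lo + hi) / 2 - lo) + (hi - (lo + hi) / 2) := by omega
        have h3 : lo + ((lo + hi) / 2 - lo) = (lo + hi) / 2 := by omega
        rw [h2, List.take_add, List.drop_drop, h3]
      have hne1 : ((A.drop lo).take ((lo + hi) / 2 - lo)).map oddOf ≠ [] := by
        simp only [ne_eq, List.map_eq_nil_iff, List.take_eq_nil_iff, List.drop_eq_nil_iff]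
        omega
      have hne2 : ((A.drop ((lo + hi) / 2)).take (hi - (lo + hi) / 2)).map oddOf ≠ [] := by
        simp only [ne_eq, List.map_eq_nil_iff, List.take_eq_nil_iff, List.drop_eq_nil_iff]
        omega
      simp only [hsplit, List.map_append, List.sum_append, Prod.mk.injEq]
      refine ⟨trivial, by push_cast; ring, ?_⟩
      rw [if_ge_eq_max, nMax_append _ _ hne1 hne2]

theorem nMax_zero (L : List Int) : L.foldl max 0 = max (nMax L) 0 := by
  cases L with
  | nil => simp [nMax]
  | cons x t =>
    show t.foldl max (max 0 x) = max (t.foldl max x) 0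
    rw [foldl_max_max t 0 x, max_comm]

-- ===== VERDICT (by name: the statement is the Claim_ definition above) =====
theorem solve_spec : Claim_equal_solve := by
  intro N A _ hpre
  show solve N A = solve_alt N A
  have hnz : ∀ x ∈ A, x ≠ 0 := fun x hx h0 => hpre (h0 ▸ hx)
  unfold solve solve_alt
  by_cases hA : A = []
  · subst hA; rfl
  · rw [if_neg hA]
    rw [foldA_spec A hnz 0 0 0,
        goB_spec A hnz A.length 0 A.length (by omega) (by simpa [List.length_pos_iff] using hA) le_rfl]
    simp only [List.drop_zero, Nat.sub_zero, List.take_length, zero_add, Int.toNat_natCast]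
    rw [nMax_zero (A.map oddOf)]
    unfold pyShl
    ring
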